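-- pv_equiv track=rewrite | github.com/lamkavan/cs-learning-2019 | Lessons/Lesson_6/Simple_Recursion/Simple_Recursion2.py | get_all_numbers
-- ===== SOURCE A (Python) =====
-- def get_all_numbers(numbers, num_of_digits):
--     # Base case
--     if num_of_digits == 1:
--         return numbers
--     # Recursive case
--     all_suffix = get_all_numbers(numbers, num_of_digits - 1)
--     all_numbers = []
--     for num in numbers:
--         for suffix in all_suffix:
--             all_numbers.append(int(str(num) + str(suffix)))
--     return all_numbers
-- ===== SOURCE B (Python) =====
-- def get_all_numbers(numbers, num_of_digits):
--     result = numbers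
--     for _ in range(num_of_digits - 1):
--         result = [int(str(num) + str(suffix)) for num in numbers for suffix in result]
--     return result
-- ===== Notes on version B (the rewrite author's own statement) =====
-- stated objective: simpler
-- what changed: The top-down recursion is replaced by a bottom-up iterative loop: start from numbers and, num_of_digits-1 times, rebuild the list with a single comprehension that prepends each num to every current suffix.
import Mathlib
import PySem

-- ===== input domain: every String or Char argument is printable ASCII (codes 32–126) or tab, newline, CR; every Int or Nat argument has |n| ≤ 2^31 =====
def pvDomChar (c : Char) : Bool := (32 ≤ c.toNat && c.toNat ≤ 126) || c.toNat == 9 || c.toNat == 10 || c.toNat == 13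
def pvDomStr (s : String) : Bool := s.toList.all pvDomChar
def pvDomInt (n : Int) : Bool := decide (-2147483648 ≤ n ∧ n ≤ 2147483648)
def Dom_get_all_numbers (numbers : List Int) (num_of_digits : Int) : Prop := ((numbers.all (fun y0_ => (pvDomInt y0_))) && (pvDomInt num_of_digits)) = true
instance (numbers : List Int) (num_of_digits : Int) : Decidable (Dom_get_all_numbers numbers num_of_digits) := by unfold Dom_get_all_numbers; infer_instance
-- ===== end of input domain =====

-- A's top-down recursion is re-implemented as a bottom-up iterative loop (simpler decomposition,
-- same cost); return values proved equal on Pre_ (num_of_digits ≥ 1 and, when it is ≥ 2,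
-- no negative elements — elsewhere Python A raises ValueError or recurses forever).


-- ===== PORT A =====
-- int(str(num) + str(suffix)); the 'none' case (Python ValueError, negative suffix) is excluded by Pre_.
def pvCat (num suffix : Int) : Int :=
  (PySem.Int.ofStr? (PySem.Int.toStr num ++ PySem.Int.toStr suffix)).getD 0

-- A's recursion, on the Nat value of num_of_digits (Python diverges for num_of_digits ≤ 0,
-- excluded by Pre_; fuel 0 is that unreachable case).
def getAllNumbersRec (numbers : List Int) : Nat → List Int
  | 0 => numbers
  | 1 => numbers
  | n + 2 =>
    let all_suffix := getAllNumbersRec numbers (n + 1)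
    numbers.foldl (fun all_numbers num =>
      all_suffix.foldl (fun acc suffix => acc ++ [pvCat num suffix]) all_numbers) []

def get_all_numbers (numbers : List Int) (num_of_digits : Int) : List Int :=
  getAllNumbersRec numbers num_of_digits.toNat

-- ===== PORT B =====
def get_all_numbers_alt (numbers : List Int) (num_of_digits : Int) : List Int :=
  (List.range (num_of_digits - 1).toNat).foldl
    (fun result _ => numbers.flatMap (fun num => result.map (fun suffix => pvCat num suffix)))
    numbers

-- ===== PRECONDITION & SPEC =====
-- Pre_ excludes num_of_digits ≤ 0 (Python A recurses without reaching the base case: RecursionError)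
-- and, for num_of_digits ≥ 2, lists with a negative element (int(str(num)+str(suffix)) raises
-- ValueError on a negative suffix).
def Pre_get_all_numbers (numbers : List Int) (num_of_digits : Int) : Prop :=
  1 ≤ num_of_digits ∧ (num_of_digits = 1 ∨ ∀ x ∈ numbers, 0 ≤ x)
instance (numbers : List Int) (num_of_digits : Int) : Decidable (Pre_get_all_numbers numbers num_of_digits) := by unfold Pre_get_all_numbers; infer_instance

def pvWitness_get_all_numbers : List Int × Int := ([1, 0, 23], 3)

def Spec_get_all_numbers (numbers : List Int) (num_of_digits : Int) (out : List Int) : Prop := out = get_all_numbers_alt numbers num_of_digits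
instance (numbers : List Int) (num_of_digits : Int) (out : List Int) : Decidable (Spec_get_all_numbers numbers num_of_digits out) := by unfold Spec_get_all_numbers; infer_instance

-- ===== CLAIM (what is proved, stated in full; the proofs are below) =====
def Claim_equal_get_all_numbers : Prop := ∀ (numbers : List Int) (num_of_digits : Int), Dom_get_all_numbers numbers num_of_digits → Pre_get_all_numbers numbers num_of_digits → Spec_get_all_numbers numbers num_of_digits (get_all_numbers numbers num_of_digits)

-- ===== LEMMAS AND PROOFS =====

-- A's nested append-loops compute B's comprehension (one step of the iteration).
theorem step_eq (numbers all_suffix : List Int) :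
    numbers.foldl (fun all_numbers num =>
      all_suffix.foldl (fun acc suffix => acc ++ [pvCat num suffix]) all_numbers) []
    = numbers.flatMap (fun num => all_suffix.map (fun suffix => pvCat num suffix)) := by
  rw [PySem.List.foldl_congr_mem numbers _
        (fun all_numbers num => all_numbers ++ all_suffix.map (fun suffix => pvCat num suffix)) []
        (fun acc num _ => PySem.List.foldl_append_singleton_eq_map _ _ _),
      PySem.List.foldl_append_eq_flatMap]
  simp

-- A's recursion at fuel k+1 equals B's k-fold iteration.
theorem rec_eq_iter (numbers : List Int) (k : Nat) :
    getAllNumbersRec numbers (k + 1)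
      = (List.range k).foldl
          (fun result _ => numbers.flatMap (fun num => result.map (fun suffix => pvCat num suffix)))
          numbers := by
  induction k with
  | zero => rfl
  | succ k ih =>
    rw [List.range_succ, List.foldl_append, ← ih]
    show getAllNumbersRec numbers (k + 2) = _
    rw [getAllNumbersRec, step_eq]
    simp [List.foldl]

-- ===== VERDICT (by name: the statement is the Claim_ definition above) =====
theorem get_all_numbers_spec : Claim_equal_get_all_numbers := by
  intro numbers num_of_digits _ hpre
  unfold Spec_get_all_numbers get_all_numbers get_all_numbers_alt
  obtain ⟨h1, -⟩ := hpre
  have ht : num_of_digits.toNat = (num_of_digits - 1).toNat + 1 := by omega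
  rw [ht, rec_eq_iter]
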